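-- pv_equiv track=rewrite | github.com/kooten111/ChibiBooru | services/implication/suggestions.py | _filter_suggestions
-- ===== SOURCE A (Python) =====
-- from typing import Dict, List
--
-- def _filter_suggestions(suggestions: List[Dict], pattern_type: str = None,
--                         source_categories: List[str] = None,
--                         implied_categories: List[str] = None,
--                         query: str = None) -> List[Dict]:
--     """Helper to filter detailed suggestions list."""
--     filtered = suggestions
--
--     # Text query filter
--     if query:
--         query = query.lower()
--         filtered = [
--             s for s in filtered
--             if query in s.get('source_tag', '').lower()
--             or query in s.get('implied_tag', '').lower()
--         ]
--
--     # Pattern type filter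
--     if pattern_type and pattern_type != 'all':
--         filtered = [s for s in filtered if s.get('pattern_type') == pattern_type]
--
--     # Source category filter
--     if source_categories and 'all' not in source_categories:
--         # Separate inclusions and exclusions
--         exclusions = [c[1:] for c in source_categories if c.startswith('!')]
--         inclusions = [c for c in source_categories if not c.startswith('!')]
--
--         filtered = [
--             s for s in filtered
--             if (not inclusions or s.get('source_category', 'general') in inclusions)
--             and (not exclusions or s.get('source_category', 'general') not in exclusions)
--         ]
--
--     # Implied category filter
--     if implied_categories and 'all' not in implied_categories:
--         # Separate inclusions and exclusions
--         exclusions = [c[1:] for c in implied_categories if c.startswith('!')]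
--         inclusions = [c for c in implied_categories if not c.startswith('!')]
--
--         filtered = [
--             s for s in filtered
--             if (not inclusions or s.get('implied_category', 'general') in inclusions)
--             and (not exclusions or s.get('implied_category', 'general') not in exclusions)
--         ]
--
--     return filtered
-- ===== SOURCE B (Python) =====
-- def _filter_suggestions(suggestions, pattern_type=None,
--                         source_categories=None,
--                         implied_categories=None,
--                         query=None):
--     """One-pass filter: precompute each filter's parameters, then keep s iff every active predicate holds."""
--     q = query.lower() if query else None
--     pt = pattern_type if pattern_type and pattern_type != 'all' else None
--
--     def split(cats):
--         if cats and 'all' not in cats: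
--             return ([c for c in cats if not c.startswith('!')],
--                     [c[1:] for c in cats if c.startswith('!')])
--         return None
--
--     src = split(source_categories)
--     imp = split(implied_categories)
--
--     def cat_ok(spec, cat):
--         if spec is None:
--             return True
--         inc, exc = spec
--         return (not inc or cat in inc) and (not exc or cat not in exc)
--
--     def keep(s):
--         if q is not None:
--             if q not in s.get('source_tag', '').lower() and q not in s.get('implied_tag', '').lower():
--                 return False
--         if pt is not None and s.get('pattern_type') != pt:
--             return False
--         return (cat_ok(src, s.get('source_category', 'general'))
--                 and cat_ok(imp, s.get('implied_category', 'general')))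
--
--     return [s for s in suggestions if keep(s)]
-- ===== Notes on version B (the rewrite author's own statement) =====
-- stated objective: simpler
-- what changed: Replaces A's four sequential list-rebuilding passes with parameters precomputed once and a single pass keeping each suggestion iff every active predicate holds.
import Mathlib
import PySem

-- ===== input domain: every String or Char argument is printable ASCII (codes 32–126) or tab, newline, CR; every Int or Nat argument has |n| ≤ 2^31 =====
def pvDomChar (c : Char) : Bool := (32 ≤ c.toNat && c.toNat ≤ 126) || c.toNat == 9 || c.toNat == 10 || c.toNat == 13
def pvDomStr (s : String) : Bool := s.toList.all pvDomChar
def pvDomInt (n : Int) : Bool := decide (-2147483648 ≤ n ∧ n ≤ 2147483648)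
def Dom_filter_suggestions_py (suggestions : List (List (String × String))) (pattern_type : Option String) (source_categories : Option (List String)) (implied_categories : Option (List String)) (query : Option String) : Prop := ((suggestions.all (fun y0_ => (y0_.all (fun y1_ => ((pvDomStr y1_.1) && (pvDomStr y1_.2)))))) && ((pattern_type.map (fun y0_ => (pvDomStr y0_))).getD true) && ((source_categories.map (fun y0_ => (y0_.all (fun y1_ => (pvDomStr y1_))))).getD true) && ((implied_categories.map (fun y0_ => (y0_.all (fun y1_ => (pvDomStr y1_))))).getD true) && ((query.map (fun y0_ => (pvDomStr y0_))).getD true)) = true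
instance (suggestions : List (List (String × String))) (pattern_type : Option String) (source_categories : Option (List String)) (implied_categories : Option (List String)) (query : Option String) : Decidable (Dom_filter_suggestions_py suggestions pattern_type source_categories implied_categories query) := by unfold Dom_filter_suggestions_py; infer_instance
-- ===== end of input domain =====

-- B merges A's four sequential list-rebuilding passes into parameters computed once plus a single filtering pass; return value proved equal.

-- s.get(k, dflt) on a dict given as an association list: first match or the default
def pvGetD (s : List (String × String)) (k dflt : String) : String :=
  match s.find? (fun p => p.1 == k) with
  | some p => p.2
  | none => dflt

-- s.get(k): first match or none
def pvGet? (s : List (String × String)) (k : String) : Option String :=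
  (s.find? (fun p => p.1 == k)).map (·.2)

-- ===== PORT A =====
def filter_suggestions_py (suggestions : List (List (String × String))) (pattern_type : Option String) (source_categories : Option (List String)) (implied_categories : Option (List String)) (query : Option String) : List (List (String × String)) :=
  let filtered := suggestions
  -- Text query filter
  let filtered :=
    match query with
    | some q =>
      if q ≠ "" then
        let ql := PySem.Str.lower q
        filtered.filter (fun s =>
          PySem.Str.isIn ql (PySem.Str.lower (pvGetD s "source_tag" "")) ||
          PySem.Str.isIn ql (PySem.Str.lower (pvGetD s "implied_tag" "")))
      else filtered
    | none => filtered
  -- Pattern type filter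
  let filtered :=
    match pattern_type with
    | some pt =>
      if pt ≠ "" && pt ≠ "all" then
        filtered.filter (fun s => pvGet? s "pattern_type" == some pt)
      else filtered
    | none => filtered
  -- Source category filter
  let filtered :=
    match source_categories with
    | some cats =>
      if cats ≠ [] && !(cats.contains "all") then
        let exclusions := (cats.filter (fun c => PySem.Str.startswith c "!")).map
          (fun c => PySem.Str.slice c (some 1) none)
        let inclusions := cats.filter (fun c => !PySem.Str.startswith c "!")
        filtered.filter (fun s =>
          (inclusions.isEmpty || inclusions.contains (pvGetD s "source_category" "general")) &&
          (exclusions.isEmpty || !exclusions.contains (pvGetD s "source_category" "general")))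
      else filtered
    | none => filtered
  -- Implied category filter
  let filtered :=
    match implied_categories with
    | some cats =>
      if cats ≠ [] && !(cats.contains "all") then
        let exclusions := (cats.filter (fun c => PySem.Str.startswith c "!")).map
          (fun c => PySem.Str.slice c (some 1) none)
        let inclusions := cats.filter (fun c => !PySem.Str.startswith c "!")
        filtered.filter (fun s =>
          (inclusions.isEmpty || inclusions.contains (pvGetD s "implied_category" "general")) &&
          (exclusions.isEmpty || !exclusions.contains (pvGetD s "implied_category" "general")))
      else filtered
    | none => filtered
  filtered

-- ===== PORT B =====
-- split(cats): the active (inclusions, exclusions) pair, or none when the filter is inactive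
def pvSplit (cats : Option (List String)) : Option (List String × List String) :=
  match cats with
  | some cs =>
    if cs ≠ [] && !(cs.contains "all") then
      some (cs.filter (fun c => !PySem.Str.startswith c "!"),
            (cs.filter (fun c => PySem.Str.startswith c "!")).map
              (fun c => PySem.Str.slice c (some 1) none))
    else none
  | none => none

-- cat_ok(spec, cat)
def pvCatOk (spec : Option (List String × List String)) (cat : String) : Bool :=
  match spec with
  | none => true
  | some (inc, exc) =>
    (inc.isEmpty || inc.contains cat) && (exc.isEmpty || !exc.contains cat)

def filter_suggestions_py_alt (suggestions : List (List (String × String))) (pattern_type : Option String) (source_categories : Option (List String)) (implied_categories : Option (List String)) (query : Option String) : List (List (String × String)) :=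
  let q : Option String :=
    match query with
    | some q0 => if q0 ≠ "" then some (PySem.Str.lower q0) else none
    | none => none
  let pt : Option String :=
    match pattern_type with
    | some p0 => if p0 ≠ "" && p0 ≠ "all" then some p0 else none
    | none => none
  let src := pvSplit source_categories
  let imp := pvSplit implied_categories
  suggestions.filter (fun s =>
    (match q with
     | none => true
     | some ql =>
       PySem.Str.isIn ql (PySem.Str.lower (pvGetD s "source_tag" "")) ||
       PySem.Str.isIn ql (PySem.Str.lower (pvGetD s "implied_tag" ""))) &&
    (match pt with
     | none => true
     | some p => pvGet? s "pattern_type" == some p) &&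
    pvCatOk src (pvGetD s "source_category" "general") &&
    pvCatOk imp (pvGetD s "implied_category" "general"))

-- ===== PRECONDITION & SPEC =====
def Spec_filter_suggestions_py (suggestions : List (List (String × String))) (pattern_type : Option String) (source_categories : Option (List String)) (implied_categories : Option (List String)) (query : Option String) (out : List (List (String × String))) : Prop := out = filter_suggestions_py_alt suggestions pattern_type source_categories implied_categories query
instance (suggestions : List (List (String × String))) (pattern_type : Option String) (source_categories : Option (List String)) (implied_categories : Option (List String)) (query : Option String) (out : List (List (String × String))) : Decidable (Spec_filter_suggestions_py suggestions pattern_type source_categories implied_categories query out) := by unfold Spec_filter_suggestions_py; infer_instance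

-- ===== CLAIM (what is proved, stated in full; the proofs are below) =====
def Claim_equal_filter_suggestions_py : Prop := ∀ (suggestions : List (List (String × String))) (pattern_type : Option String) (source_categories : Option (List String)) (implied_categories : Option (List String)) (query : Option String), Dom_filter_suggestions_py suggestions pattern_type source_categories implied_categories query → Spec_filter_suggestions_py suggestions pattern_type source_categories implied_categories query (filter_suggestions_py suggestions pattern_type source_categories implied_categories query)

-- ===== LEMMAS AND PROOFS =====

-- ===== VERDICT (by name: the statement is the Claim_ definition above) =====
set_option maxHeartbeats 1000000 in
theorem filter_suggestions_py_spec : Claim_equal_filter_suggestions_py := by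
  intro suggestions pattern_type source_categories implied_categories query _
  unfold Spec_filter_suggestions_py filter_suggestions_py filter_suggestions_py_alt pvSplit
  rcases query with _ | q <;> rcases pattern_type with _ | pt <;>
    rcases source_categories with _ | sc <;> rcases implied_categories with _ | ic <;>
    dsimp only [] <;> (try split_ifs) <;>
    simp only [pvCatOk, List.filter_filter, Bool.true_and, Bool.and_true, List.filter_true]
  all_goals refine List.filter_congr fun s _ => ?_
  all_goals ac_rfl
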